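-- pv_equiv track=rewrite | github.com/jorneilander/AdventOfCode | 2019/Day 6 - Universal Orbit Map/solution.py | parse_orbits_dict
-- ===== SOURCE A (Python) =====
-- def parse_orbits_dict(orbits_dict):
--     total = 0
--     routes = []
--
--     def inner(one, two, route, acc=0):
--         route.append(two)
--         orbited_station = orbits_dict.get(two)
--         if orbited_station is not None:
--             return inner(two, orbited_station, route, acc + 1)
--         return acc + 1, route
--
--     for k, v in orbits_dict.items():
--         x = inner(k, v, [k])
--         total = total + x[0]
--         routes.append(x[1])
--
--     return total, routes
-- ===== SOURCE B (Python) =====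
-- def parse_orbits_dict(orbits_dict):
--     def chain(k):
--         route = [k]
--         two = orbits_dict.get(k)
--         while two is not None:
--             route.append(two)
--             two = orbits_dict.get(two)
--         return route
--
--     routes = [chain(k) for k in orbits_dict]
--     total = sum(len(r) - 1 for r in routes)
--     return total, routes
-- ===== Notes on version B (the rewrite author's own statement) =====
-- stated objective: simpler
-- what changed: Replaces the recursive accumulator-carrying inner helper with a plain while-loop that builds each route, and derives the total from route lengths instead of threading a counter.
import Mathlib
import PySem

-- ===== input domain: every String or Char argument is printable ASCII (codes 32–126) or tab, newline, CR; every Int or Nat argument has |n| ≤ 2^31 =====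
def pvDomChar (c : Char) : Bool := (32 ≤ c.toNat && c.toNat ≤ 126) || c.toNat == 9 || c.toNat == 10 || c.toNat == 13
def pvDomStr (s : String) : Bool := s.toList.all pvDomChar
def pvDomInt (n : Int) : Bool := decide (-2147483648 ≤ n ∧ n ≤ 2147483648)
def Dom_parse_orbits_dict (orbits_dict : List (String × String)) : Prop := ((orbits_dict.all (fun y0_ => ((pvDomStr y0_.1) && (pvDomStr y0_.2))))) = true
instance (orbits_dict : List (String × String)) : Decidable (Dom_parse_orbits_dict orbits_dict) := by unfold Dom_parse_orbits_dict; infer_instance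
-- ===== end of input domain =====

-- B replaces A's recursive counter-carrying helper with a while-loop building each route
-- and derives the total from route lengths (objective: simpler).


-- dict.get on the association list (first match; = Python dict.get when keys are distinct)
def pvGet (d : List (String × String)) (s : String) : Option String :=
  (d.find? (fun p => p.1 == s)).map Prod.snd

-- ===== PORT A =====
-- A's recursive `inner`: append `two`, look up its parent, recurse with acc+1.
-- Fuel (length+1) only makes it total; under Pre_ it never runs out.
def pvInnerA (d : List (String × String)) : Nat → String → List String → Int → Int × List String
  | 0, two, route, acc => (acc + 1, route ++ [two])
  | n+1, two, route, acc =>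
    match pvGet d two with
    | some w => pvInnerA d n w (route ++ [two]) (acc + 1)
    | none => (acc + 1, route ++ [two])

def parse_orbits_dict (orbits_dict : List (String × String)) : Int × List (List String) :=
  orbits_dict.foldl
    (fun st p =>
      let x := pvInnerA orbits_dict (orbits_dict.length + 1) p.2 [p.1] 0
      (st.1 + x.1, st.2 ++ [x.2]))
    ((0 : Int), ([] : List (List String)))

-- ===== PORT B =====
-- B's while-loop: while two is not None: route.append(two); two = get(two).
def pvChainB (d : List (String × String)) : Nat → List String → Option String → List String
  | _, route, none => route
  | 0, route, some s => route ++ [s]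
  | n+1, route, some s => pvChainB d n (route ++ [s]) (pvGet d s)

def parse_orbits_dict_alt (orbits_dict : List (String × String)) : Int × List (List String) :=
  let routes := (orbits_dict.map Prod.fst).map
    (fun k => pvChainB orbits_dict (orbits_dict.length + 1) [k] (pvGet orbits_dict k))
  (routes.foldl (fun t r => t + ((r.length : Int) - 1)) 0, routes)

-- ===== PRECONDITION & SPEC =====
-- one lookup step, as a total function on Option String
def pvStepO (d : List (String × String)) : Option String → Option String
  | none => none
  | some s => pvGet d s

-- Pre_ excludes two kinds of inputs: association lists with duplicate keys (an artefact of
-- encoding a Python dict, which cannot hold duplicates), and cyclic parent chains, on which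
-- the Python A raises RecursionError (it never returns a value there).
def Pre_parse_orbits_dict (orbits_dict : List (String × String)) : Prop :=
  (orbits_dict.map Prod.fst).Nodup ∧
  ∀ p ∈ orbits_dict, (pvStepO orbits_dict)^[orbits_dict.length + 1] (some p.2) = none

instance (orbits_dict : List (String × String)) : Decidable (Pre_parse_orbits_dict orbits_dict) := by
  unfold Pre_parse_orbits_dict; infer_instance

def pvWitness_parse_orbits_dict : (List (String × String)) :=
  [("B", "COM"), ("C", "B"), ("D", "C")]

def Spec_parse_orbits_dict (orbits_dict : List (String × String)) (out : Int × List (List String)) : Prop := out = parse_orbits_dict_alt orbits_dict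
instance (orbits_dict : List (String × String)) (out : Int × List (List String)) : Decidable (Spec_parse_orbits_dict orbits_dict out) := by unfold Spec_parse_orbits_dict; infer_instance

-- ===== CLAIM (what is proved, stated in full; the proofs are below) =====
def Claim_equal_parse_orbits_dict : Prop := ∀ (orbits_dict : List (String × String)), Dom_parse_orbits_dict orbits_dict → Pre_parse_orbits_dict orbits_dict → Spec_parse_orbits_dict orbits_dict (parse_orbits_dict orbits_dict)

-- ===== LEMMAS AND PROOFS =====

theorem pvInner_snd (d : List (String × String)) :
    ∀ (n : Nat) (two : String) (route : List String) (acc : Int),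
      (pvInnerA d n two route acc).2 = pvChainB d n route (some two) := by
  intro n
  induction n with
  | zero => intro two route acc; simp [pvInnerA, pvChainB]
  | succ n ih =>
    intro two route acc
    simp only [pvInnerA, pvChainB]
    cases h : pvGet d two with
    | none => simp [pvChainB]
    | some w => simp [ih]

theorem pvInner_fst (d : List (String × String)) :
    ∀ (n : Nat) (two : String) (route : List String) (acc : Int),
      (pvInnerA d n two route acc).1 =
        acc + ((pvInnerA d n two route acc).2.length : Int) - (route.length : Int) := by
  intro n
  induction n with
  | zero => intro two route acc; simp [pvInnerA]; ring
  | succ n ih =>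
    intro two route acc
    simp only [pvInnerA]
    cases h : pvGet d two with
    | none => simp; ring
    | some w =>
      simp only [ih]
      simp [List.length_append]
      ring

theorem pvGet_self (p : String × String) :
    ∀ (d : List (String × String)), (d.map Prod.fst).Nodup → p ∈ d → pvGet d p.1 = some p.2 := by
  intro d
  induction d with
  | nil => intro _ h; cases h
  | cons q t ih =>
    intro hnd hmem
    simp only [List.map_cons, List.nodup_cons] at hnd
    rcases List.mem_cons.mp hmem with rfl | hm
    · simp [pvGet]
    · have hne : (q.1 == p.1) = false := by
        rcases Bool.eq_false_or_eq_true (q.1 == p.1) with h | h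
        · exact absurd (List.mem_map.mpr ⟨p, hm, (beq_iff_eq.mp h).symm⟩) hnd.1
        · exact h
      simp only [pvGet, List.find?_cons, hne]
      exact ih hnd.2 hm

theorem pvItem_eq (d : List (String × String)) (F : Nat) (k v : String)
    (h : pvGet d k = some v) :
    pvInnerA d F v [k] 0 =
      (((pvChainB d F [k] (pvGet d k)).length : Int) - 1, pvChainB d F [k] (pvGet d k)) := by
  have h2 : (pvInnerA d F v [k] 0).2 = pvChainB d F [k] (pvGet d k) := by
    rw [h]
    exact pvInner_snd d F v [k] 0
  have h1 := pvInner_fst d F v [k] 0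
  rw [h2] at h1
  have : pvInnerA d F v [k] 0 = ((pvInnerA d F v [k] 0).1, (pvInnerA d F v [k] 0).2) := rfl
  rw [this, h1, h2]
  simp

theorem pvFold_eq (d : List (String × String)) (F : Nat)
    (c : String → List String) (hc : ∀ k, c k = pvChainB d F [k] (pvGet d k)) :
    ∀ (l : List (String × String)) (t : Int) (rs : List (List String)),
      (∀ p ∈ l, pvGet d p.1 = some p.2) →
      l.foldl (fun st p =>
          let x := pvInnerA d F p.2 [p.1] 0
          (st.1 + x.1, st.2 ++ [x.2])) (t, rs)
        = (((l.map Prod.fst).map c).foldl (fun t r => t + ((r.length : Int) - 1)) t,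
           rs ++ (l.map Prod.fst).map c) := by
  intro l
  induction l with
  | nil => intro t rs _; simp
  | cons p tl ih =>
    intro t rs hl
    have hp : pvGet d p.1 = some p.2 := hl p (List.mem_cons_self ..)
    simp only [List.foldl_cons, List.map_cons]
    rw [pvItem_eq d F p.1 p.2 hp, ← hc p.1]
    have := ih (t + ((c p.1).length - 1)) (rs ++ [c p.1]) (fun q hq => hl q (List.mem_cons_of_mem _ hq))
    simp only [hc] at this ⊢
    rw [this]
    simp [List.append_assoc]

-- ===== VERDICT (by name: the statement is the Claim_ definition above) =====
theorem parse_orbits_dict_spec : Claim_equal_parse_orbits_dict := by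
  intro d _ hpre
  unfold Spec_parse_orbits_dict parse_orbits_dict parse_orbits_dict_alt
  have hl : ∀ p ∈ d, pvGet d p.1 = some p.2 := fun p hp => pvGet_self p d hpre.1 hp
  exact pvFold_eq d (d.length + 1) _ (fun _ => rfl) d 0 [] hl
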